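-- pv_equiv track=rewrite | github.com/biocad/abase | collect_db.py | check_names
-- ===== SOURCE A (Python) =====
-- def check_names(names):
--     if len(list(frozenset(names))) == 1:
--         return True
--
--     split_names = list(
--         map(lambda x: list(map(lambda t: t.upper(), x.split())), names))
--
--     if len(list(frozenset(map(lambda x: len(x), split_names)))) != 1:
--         return False
--
--     common_set = set(split_names[0])
--
--     for x in split_names[1:]:
--         common_set &= set(x)
--
--     uncommon_set = set([])
--
--     for x in split_names:
--         for y in x:
--             if y not in common_set:
--                 uncommon_set.add(y.upper())
--
--     unknown_list = list(uncommon_set)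
--
--     for x in uncommon_set:
--         if all(map(lambda t: t not in x, ['HEAVY', 'LIGHT'])):
--             return False
--
--     return len(unknown_list) == 2
-- ===== SOURCE B (Python) =====
-- def check_names(names):
--     if len(set(names)) == 1:
--         return True
--     split = [[w.upper() for w in x.split()] for x in names]
--     if len({len(ws) for ws in split}) != 1:
--         return False
--     n = len(names)
--     votes = {}
--     for ws in split:
--         for w in set(ws):
--             votes[w] = votes.get(w, 0) + 1
--     uncommon = [w for w, c in votes.items() if c < n]
--     return all('HEAVY' in w or 'LIGHT' in w for w in uncommon) and len(uncommon) == 2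
-- ===== Notes on version B (the rewrite author's own statement) =====
-- stated objective: idiomatic
-- what changed: The running set-intersection over the names plus a second membership-testing pass is replaced by a single vote tally (one vote per name per distinct word) from which the uncommon words are read off as the entries with fewer votes than names.
import Mathlib
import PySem

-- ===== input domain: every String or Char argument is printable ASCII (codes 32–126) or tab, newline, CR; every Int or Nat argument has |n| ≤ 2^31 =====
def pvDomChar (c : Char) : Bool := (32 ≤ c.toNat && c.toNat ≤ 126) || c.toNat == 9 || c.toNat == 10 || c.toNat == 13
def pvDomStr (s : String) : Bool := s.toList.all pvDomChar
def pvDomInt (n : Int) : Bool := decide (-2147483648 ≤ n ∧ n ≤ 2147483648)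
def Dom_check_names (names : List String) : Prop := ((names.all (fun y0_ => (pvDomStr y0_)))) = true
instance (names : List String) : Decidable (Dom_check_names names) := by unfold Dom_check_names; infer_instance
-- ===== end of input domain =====

-- B replaces A's running set-intersection + second uncommon pass by a one-build vote tally
-- (one vote per name per distinct word); equal return value, objective: idiomatic/alternative.

-- ===== PORT A =====
-- split_names = [[t.upper() for t in x.split()] for x in names]
def pvSplitA (names : List String) : List (List String) :=
  names.map (fun x => (PySem.Str.split₀ x).map PySem.Str.upper)

-- common_set = set(split_names[0]); for x in split_names[1:]: common_set &= set(x)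
-- (split_names is nonempty whenever this helper is reached; headD [] stands for split_names[0])
def pvCommonA (S : List (List String)) : PySem.Set String :=
  (S.drop 1).foldl (fun acc x => PySem.Set.inter acc (PySem.Set.ofList x))
    (PySem.Set.ofList (S.headD []))

-- uncommon_set = set(); for x in split_names: for y in x: if y not in common_set: uncommon_set.add(y.upper())
def pvUncommonA (S : List (List String)) (C : PySem.Set String) : PySem.Set String :=
  S.foldl (fun us x =>
      x.foldl (fun us y =>
        if !(PySem.Set.contains C y) then PySem.Set.add us (PySem.Str.upper y) else us) us)
    PySem.Set.empty

def check_names (names : List String) : Bool :=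
  if (PySem.Set.ofList names).length == 1 then true
  else
    if (PySem.Set.ofList ((pvSplitA names).map (fun x => x.length))).length != 1 then false
    else
      -- for x in uncommon_set: if all(t not in x for t in ['HEAVY','LIGHT']): return False
      -- (whether SOME element fails the test is independent of the set's iteration order)
      if (pvUncommonA (pvSplitA names) (pvCommonA (pvSplitA names))).any
           (fun x => !(PySem.Str.isIn "HEAVY" x) && !(PySem.Str.isIn "LIGHT" x)) then false
      else (pvUncommonA (pvSplitA names) (pvCommonA (pvSplitA names))).length == 2

-- ===== PORT B =====
-- split = [[w.upper() for w in x.split()] for x in names]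
def pvSplitB (names : List String) : List (List String) :=
  names.map (fun x => (PySem.Str.split₀ x).map PySem.Str.upper)

-- votes = {}; for ws in split: for w in set(ws): votes[w] = votes.get(w, 0) + 1
def pvVotesB (S : List (List String)) : PySem.Dict String Int :=
  S.foldl (fun d ws =>
      (PySem.Set.ofList ws).foldl (fun d w => d.insert w (d.getD w 0 + 1)) d)
    PySem.Dict.empty

-- uncommon = [w for w, c in votes.items() if c < n]
-- (the dict is only looked up / counted afterwards, so its order never shows in the result)
def pvUncommonB (S : List (List String)) (n : Int) : List String :=
  ((pvVotesB S).items.filter (fun p => p.2 < n)).map Prod.fst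

def check_names_alt (names : List String) : Bool :=
  if (PySem.Set.ofList names).length == 1 then true
  else
    if (PySem.Set.ofList ((pvSplitB names).map (fun ws => ws.length))).length != 1 then false
    else
      (pvUncommonB (pvSplitB names) (names.length : Int)).all
          (fun w => PySem.Str.isIn "HEAVY" w || PySem.Str.isIn "LIGHT" w)
        && ((pvUncommonB (pvSplitB names) (names.length : Int)).length == 2)

-- ===== PRECONDITION & SPEC =====
def Spec_check_names (names : List String) (out : Bool) : Prop := out = check_names_alt names
instance (names : List String) (out : Bool) : Decidable (Spec_check_names names out) := by unfold Spec_check_names; infer_instance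

-- ===== CLAIM (what is proved, stated in full; the proofs are below) =====
def Claim_equal_check_names : Prop := ∀ (names : List String), Dom_check_names names → Spec_check_names names (check_names names)

-- ===== LEMMAS AND PROOFS =====

lemma upperChar_idem (c : Char) :
    PySem.Chars.upperChar (PySem.Chars.upperChar c) = PySem.Chars.upperChar c := by
  unfold PySem.Chars.upperChar PySem.Chars.islower
  split_ifs with h1 h2 <;> try rfl
  exfalso
  simp [Char.le_def, UInt32.le_iff_toNat_le] at h1 h2
  have hub : c.toNat ≤ 122 := h1.2
  have hval : Nat.isValidChar (c.toNat - 32) := Or.inl (by omega)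
  have hh := Char.toNat_ofNat (c.toNat - 32)
  rw [if_pos hval] at hh
  have h2' : 97 ≤ (Char.ofNat (c.toNat - 32)).toNat := h2.1
  omega

lemma upper_idem (s : String) : PySem.Str.upper (PySem.Str.upper s) = PySem.Str.upper s := by
  apply String.toList_inj.mp
  simp [pysem, PySem.Chars.upper, List.map_map, Function.comp]
  intro a _
  exact upperChar_idem a

-- every word of pvSplitA/B is fixed by upper
lemma word_upper_fix {names : List String} {x : List String} {y : String}
    (hx : x ∈ pvSplitA names) (hy : y ∈ x) : PySem.Str.upper y = y := by
  unfold pvSplitA at hx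
  obtain ⟨n, _, rfl⟩ := List.mem_map.mp hx
  obtain ⟨t, _, rfl⟩ := List.mem_map.mp hy
  exact upper_idem t

-- membership in the running intersection
lemma mem_foldl_inter (l : List (List String)) (acc : PySem.Set String) (y : String) :
    y ∈ l.foldl (fun a x => PySem.Set.inter a (PySem.Set.ofList x)) acc
      ↔ y ∈ acc ∧ ∀ x ∈ l, y ∈ x := by
  induction l generalizing acc with
  | nil => simp
  | cons h t ih =>
    simp [List.foldl_cons, ih, PySem.Set.mem_inter, PySem.Set.mem_ofList]
    tauto

lemma mem_common (S : List (List String)) (hS : S ≠ []) (y : String) :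
    y ∈ pvCommonA S ↔ ∀ x ∈ S, y ∈ x := by
  obtain ⟨h, t, rfl⟩ := List.exists_cons_of_ne_nil hS
  unfold pvCommonA
  simp [mem_foldl_inter, PySem.Set.mem_ofList]

-- A's uncommon set: membership and nodup
lemma mem_uncommonA_inner (x : List String) (C us : PySem.Set String) (z : String) :
    z ∈ x.foldl (fun us y =>
        if !(PySem.Set.contains C y) then PySem.Set.add us (PySem.Str.upper y) else us) us
      ↔ z ∈ us ∨ ∃ y ∈ x, z = PySem.Str.upper y ∧ y ∉ C := by
  induction x generalizing us with
  | nil => simp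
  | cons h t ih =>
    simp only [List.foldl_cons]
    rw [ih]
    by_cases hc : h ∈ C
    · simp [hc]
    · simp [hc, PySem.Set.mem_add]
      tauto

lemma mem_uncommonA (S : List (List String)) (C : PySem.Set String) (z : String) :
    z ∈ pvUncommonA S C ↔ ∃ x ∈ S, ∃ y ∈ x, z = PySem.Str.upper y ∧ y ∉ C := by
  unfold pvUncommonA
  have main : ∀ (S : List (List String)) (us : PySem.Set String),
      z ∈ S.foldl (fun us x =>
        x.foldl (fun us y =>
          if !(PySem.Set.contains C y) then PySem.Set.add us (PySem.Str.upper y) else us) us) us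
      ↔ z ∈ us ∨ ∃ x ∈ S, ∃ y ∈ x, z = PySem.Str.upper y ∧ y ∉ C := by
    intro S
    induction S with
    | nil => simp
    | cons hd tl ih =>
      intro us
      simp only [List.foldl_cons]
      rw [ih, mem_uncommonA_inner]
      simp only [List.mem_cons]
      constructor
      · rintro ((h | ⟨y, hy, hz, hnc⟩) | ⟨x, hx, y, hy, hz, hnc⟩)
        · exact Or.inl h
        · exact Or.inr ⟨hd, Or.inl rfl, y, hy, hz, hnc⟩
        · exact Or.inr ⟨x, Or.inr hx, y, hy, hz, hnc⟩
      · rintro (h | ⟨x, (rfl | hx), y, hy, hz, hnc⟩)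
        · exact Or.inl (Or.inl h)
        · exact Or.inl (Or.inr ⟨y, hy, hz, hnc⟩)
        · exact Or.inr ⟨x, hx, y, hy, hz, hnc⟩
  rw [main]
  simp [PySem.Set.empty]

lemma nodup_uncommonA (S : List (List String)) (C : PySem.Set String) :
    (pvUncommonA S C).Nodup := by
  unfold pvUncommonA
  have inner : ∀ (x : List String) (us : PySem.Set String), us.Nodup →
      (x.foldl (fun us y =>
        if !(PySem.Set.contains C y) then PySem.Set.add us (PySem.Str.upper y) else us) us).Nodup := by
    intro x
    induction x with
    | nil => intro us h; simpa using h
    | cons h t ih =>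
      intro us hus
      simp only [List.foldl_cons]
      apply ih
      split
      · exact PySem.Set.nodup_add _ _ hus
      · exact hus
  have outer : ∀ (S : List (List String)) (us : PySem.Set String), us.Nodup →
      (S.foldl (fun us x =>
        x.foldl (fun us y =>
          if !(PySem.Set.contains C y) then PySem.Set.add us (PySem.Str.upper y) else us) us) us).Nodup := by
    intro S
    induction S with
    | nil => intro us h; simpa using h
    | cons hd tl ih =>
      intro us hus
      exact ih _ (inner hd us hus)
  exact outer S PySem.Set.empty (by simp [PySem.Set.empty])

-- B's votes: value and keys
lemma getD_votes (S : List (List String)) (w : String) :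
    (pvVotesB S).getD w 0 = (S.countP (fun ws => decide (w ∈ ws)) : Int) := by
  unfold pvVotesB
  have main : ∀ (S : List (List String)) (d : PySem.Dict String Int),
      (S.foldl (fun d ws =>
          (PySem.Set.ofList ws).foldl (fun d w => d.insert w (d.getD w 0 + 1)) d) d).getD w 0
        = d.getD w 0 + (S.countP (fun ws => decide (w ∈ ws)) : Int) := by
    intro S
    induction S with
    | nil => simp
    | cons hd tl ih =>
      intro d
      simp only [List.foldl_cons]
      rw [ih, PySem.Dict.getD_foldl_insert_add_one]
      have hc : (List.count w (PySem.Set.ofList hd) : Int) = if w ∈ hd then 1 else 0 := by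
        by_cases hw : w ∈ hd
        · rw [List.count_eq_one_of_mem (PySem.Set.nodup_ofList hd) ((PySem.Set.mem_ofList hd w).mpr hw)]
          simp [hw]
        · rw [List.count_eq_zero_of_not_mem (fun hh => hw ((PySem.Set.mem_ofList hd w).mp hh))]
          simp [hw]
      rw [hc, List.countP_cons]
      by_cases hw : w ∈ hd <;> simp [hw] <;> push_cast <;> ring
  rw [main]
  simp

lemma nodup_keys_votes (S : List (List String)) : (pvVotesB S).keys.Nodup := by
  unfold pvVotesB
  have main : ∀ (S : List (List String)) (d : PySem.Dict String Int), d.keys.Nodup →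
      (S.foldl (fun d ws =>
          (PySem.Set.ofList ws).foldl (fun d w => d.insert w (d.getD w 0 + 1)) d) d).keys.Nodup := by
    intro S
    induction S with
    | nil => intro d h; simpa using h
    | cons hd tl ih =>
      intro d hd'
      apply ih
      rw [PySem.Dict.keys_foldl_insert]
      exact PySem.Set.nodup_update _ _ hd'
  exact main S PySem.Dict.empty (by simp)

lemma mem_keys_votes (S : List (List String)) (w : String) :
    w ∈ (pvVotesB S).keys ↔ ∃ ws ∈ S, w ∈ ws := by
  unfold pvVotesB
  have main : ∀ (S : List (List String)) (d : PySem.Dict String Int),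
      w ∈ (S.foldl (fun d ws =>
          (PySem.Set.ofList ws).foldl (fun d w => d.insert w (d.getD w 0 + 1)) d) d).keys
        ↔ w ∈ d.keys ∨ ∃ ws ∈ S, w ∈ ws := by
    intro S
    induction S with
    | nil => simp
    | cons hd tl ih =>
      intro d
      simp only [List.foldl_cons]
      rw [ih, PySem.Dict.keys_foldl_insert]
      simp only [PySem.Set.mem_update, PySem.Set.mem_ofList, List.mem_cons]
      constructor
      · rintro ((h | h) | ⟨ws, hws, hw⟩)
        · exact Or.inl h
        · exact Or.inr ⟨hd, Or.inl rfl, h⟩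
        · exact Or.inr ⟨ws, Or.inr hws, hw⟩
      · rintro (h | ⟨ws, (rfl | hws), hw⟩)
        · exact Or.inl (Or.inl h)
        · exact Or.inl (Or.inr hw)
        · exact Or.inr ⟨ws, hws, hw⟩
  rw [main]
  simp

lemma mem_uncommonB (S : List (List String)) (n : Int) (w : String) :
    w ∈ pvUncommonB S n ↔ w ∈ (pvVotesB S).keys ∧ (pvVotesB S).getD w 0 < n := by
  unfold pvUncommonB
  simp only [List.mem_map, List.mem_filter]
  constructor
  · rintro ⟨⟨k, v⟩, ⟨hitems, hlt⟩, rfl⟩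
    refine ⟨PySem.Dict.mem_keys_of_mem_items _ hitems, ?_⟩
    rw [PySem.Dict.getD_of_mem_items _ hitems (nodup_keys_votes S)]
    simpa using hlt
  · rintro ⟨hk, hlt⟩
    have hcont : (pvVotesB S).contains w = true := (PySem.Dict.contains_iff_mem_keys _ _).mpr hk
    rw [PySem.Dict.contains_eq_isSome_get?] at hcont
    obtain ⟨v, hv⟩ := Option.isSome_iff_exists.mp hcont
    have hgetD : (pvVotesB S).getD w 0 = v := PySem.Dict.getD_of_get?_eq_some _ 0 hv
    refine ⟨(w, v), ⟨PySem.Dict.mem_items_of_get?_eq_some _ hv, ?_⟩, rfl⟩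
    simp [← hgetD, hlt]

lemma nodup_uncommonB (S : List (List String)) (n : Int) : (pvUncommonB S n).Nodup := by
  unfold pvUncommonB
  have hsub := (List.filter_sublist (l := (pvVotesB S).items)
      (p := fun p => decide (p.2 < n))).map Prod.fst
  have hk := nodup_keys_votes S
  simp only [PySem.Dict.keys] at hk
  exact hk.sublist hsub

-- the two uncommon collections have the same members
lemma uncommon_same_mem (names : List String) (hne : names ≠ []) (z : String) :
    z ∈ pvUncommonA (pvSplitA names) (pvCommonA (pvSplitA names))
      ↔ z ∈ pvUncommonB (pvSplitB names) (names.length : Int) := by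
  have hSB : pvSplitB names = pvSplitA names := rfl
  have hSne : pvSplitA names ≠ [] := by simp [pvSplitA, hne]
  have hlen : (pvSplitA names).length = names.length := List.length_map ..
  rw [hSB, mem_uncommonA, mem_uncommonB]
  constructor
  · rintro ⟨x, hx, y, hy, rfl, hnc⟩
    rw [word_upper_fix hx hy]
    refine ⟨(mem_keys_votes _ y).mpr ⟨x, hx, hy⟩, ?_⟩
    rw [getD_votes]
    have hnotall : ¬ ∀ x' ∈ pvSplitA names, y ∈ x' :=
      fun hall => hnc ((mem_common _ hSne y).mpr hall)
    have hle := List.countP_le_length (p := fun ws => decide (y ∈ ws)) (l := pvSplitA names)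
    have hneq : (pvSplitA names).countP (fun ws => decide (y ∈ ws)) ≠ (pvSplitA names).length := by
      intro he
      exact hnotall (fun x' hx' => by simpa using List.countP_eq_length.mp he x' hx')
    have hlt := lt_of_le_of_ne hle hneq
    rw [← hlen]
    exact_mod_cast hlt
  · rintro ⟨hk, hlt⟩
    obtain ⟨ws, hws, hz⟩ := (mem_keys_votes _ z).mp hk
    refine ⟨ws, hws, z, hz, (word_upper_fix hws hz).symm, ?_⟩
    intro hcz
    have hall := (mem_common _ hSne z).mp hcz
    rw [getD_votes] at hlt
    have heq : (pvSplitA names).countP (fun ws => decide (z ∈ ws)) = (pvSplitA names).length :=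
      List.countP_eq_length.mpr (fun x hx => by simpa using hall x hx)
    rw [heq, hlen] at hlt
    simp at hlt

lemma uncommon_perm (names : List String) (hne : names ≠ []) :
    (pvUncommonA (pvSplitA names) (pvCommonA (pvSplitA names))).Perm
      (pvUncommonB (pvSplitB names) (names.length : Int)) := by
  exact (List.perm_ext_iff_of_nodup (nodup_uncommonA _ _) (nodup_uncommonB _ _)).mpr
    (uncommon_same_mem names hne)

-- ===== VERDICT (by name: the statement is the Claim_ definition above) =====
theorem check_names_spec : Claim_equal_check_names := by
  intro names _
  unfold Spec_check_names
  by_cases hne : names = []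
  · subst hne; decide
  · unfold check_names check_names_alt
    have hSB : pvSplitB names = pvSplitA names := rfl
    rw [hSB]
    split_ifs with h1 h2 hany
    · rfl
    · rfl
    · -- some uncommon word fails the HEAVY/LIGHT test: both sides are false
      have hmem := uncommon_same_mem names hne
      rw [hSB] at hmem
      obtain ⟨x, hx, hp⟩ := List.any_eq_true.mp hany
      have hxB := (hmem x).mp hx
      have hfail : ((pvUncommonB (pvSplitA names) (names.length : Int)).all
          (fun w => PySem.Str.isIn "HEAVY" w || PySem.Str.isIn "LIGHT" w)) = false := by
        rw [List.all_eq_false]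
        exact ⟨x, hxB, by simpa using hp⟩
      rw [hfail]
      simp
    · -- every uncommon word passes: both sides reduce to the length test
      have hmem := uncommon_same_mem names hne
      have hlen := (uncommon_perm names hne).length_eq
      rw [hSB] at hmem hlen
      have hall : ((pvUncommonB (pvSplitA names) (names.length : Int)).all
          (fun w => PySem.Str.isIn "HEAVY" w || PySem.Str.isIn "LIGHT" w)) = true := by
        rw [List.all_eq_true]
        intro w hw
        have hwA := (hmem w).mpr hw
        have hno := fun h => hany (List.any_eq_true.mpr ⟨w, hwA, h⟩)
        cases hH : PySem.Str.isIn "HEAVY" w <;> cases hL : PySem.Str.isIn "LIGHT" w <;> simp_all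
      rw [hall, hlen]
      simp
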